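-- pv_equiv track=rewrite | github.com/mortyc126-debug/SHA | p37_c4_j24_deep.py | compute_f17_j
-- ===== SOURCE A (Python) =====
-- MASK = 0xFFFFFFFF
--
-- def rotr(x, n): return ((x >> n) | (x << (32-n))) & MASK
--
-- def sig0(x):  return rotr(x,7) ^ rotr(x,18) ^ (x>>3)
--
-- def sig1(x):  return rotr(x,17) ^ rotr(x,19) ^ (x>>10)
--
-- def Sig0(x):  return rotr(x,2) ^ rotr(x,13) ^ rotr(x,22)
--
-- def Sig1(x):  return rotr(x,6) ^ rotr(x,11) ^ rotr(x,25)
--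
-- def Ch(e,f,g):  return ((e&f) ^ (~e&g)) & MASK
--
-- def Maj(a,b,c): return (a&b) ^ (a&c) ^ (b&c)
--
-- K = [0x428a2f98,0x71374491,0xb5c0fbcf,0xe9b5dba5,0x3956c25b,0x59f111f1,0x923f82a4,0xab1c5ed5,
--      0xd807aa98,0x12835b01,0x243185be,0x550c7dc3,0x72be5d74,0x80deb1fe,0x9bdc06a7,0xc19bf174,
--      0xe49b69c1,0xefbe4786,0x0fc19dc6,0x240ca1cc,0x2de92c6f,0x4a7484aa,0x5cb0a9dc,0x76f988da,
--      0x983e5152,0xa831c66d,0xb00327c8,0xbf597fc7,0xc6e00bf3,0xd5a79147,0x06ca6351,0x14292967,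
--      0x27b70a85,0x2e1b2138,0x4d2c6dfc,0x53380d13,0x650a7354,0x766a0abb,0x81c2c92e,0x92722c85,
--      0xa2bfe8a1,0xa81a664b,0xc24b8b70,0xc76c51a3,0xd192e819,0xd6990624,0xf40e3585,0x106aa070,
--      0x19a4c116,0x1e376c08,0x2748774c,0x34b0bcb5,0x391c0cb3,0x4ed8aa4a,0x5b9cca4f,0x682e6ff3,
--      0x748f82ee,0x78a5636f,0x84c87814,0x8cc70208,0x90befffa,0xa4506ceb,0xbef9a3f7,0xc67178f2]
--
-- IV = [0x6a09e667,0xbb67ae85,0x3c6ef372,0xa54ff53a,0x510e527f,0x9b05688c,0x1f83d9ab,0x5be0cd19]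
--
-- def make_schedule(W16):
--     W = list(W16) + [0]*48
--     for i in range(16, 64):
--         W[i] = (sig1(W[i-2]) + W[i-7] + sig0(W[i-15]) + W[i-16]) & MASK
--     return W
--
-- def sha_rounds(W, R):
--     a,b,c,d,e,f,g,h = IV
--     sts = [[a,b,c,d,e,f,g,h]]
--     for r in range(R):
--         T1=(h+Sig1(e)+Ch(e,f,g)+K[r]+W[r])&MASK; T2=(Sig0(a)+Maj(a,b,c))&MASK
--         h=g;g=f;f=e;e=(d+T1)&MASK;d=c;c=b;b=a;a=(T1+T2)&MASK
--         sts.append([a,b,c,d,e,f,g,h])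
--     return sts
--
-- def compute_f17_j(W0, W1, j):
--     DW0 = 1 << j
--     Wn = [W0, W1] + [0]*14
--     DWs = [0]*16; DWs[0] = DW0
--     Wf_tmp = [(Wn[i]+DWs[i])&MASK for i in range(16)]
--     sn3 = sha_rounds(make_schedule(Wn), 3)
--     sf3 = sha_rounds(make_schedule(Wf_tmp), 3)
--     DWs[2] = (-(sf3[3][4] - sn3[3][4])) & MASK
--     for step in range(13):
--         wi = step+3; dt = step+4
--         Wfc = [(Wn[i]+DWs[i])&MASK for i in range(16)]
--         sn = sha_rounds(make_schedule(Wn), dt)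
--         sf = sha_rounds(make_schedule(Wfc), dt)
--         DWs[wi] = (-(sf[dt][4] - sn[dt][4])) & MASK
--     Wf = [(Wn[i]+DWs[i])&MASK for i in range(16)]
--     Wn_s = make_schedule(Wn); Wf_s = make_schedule(Wf)
--     sn = sha_rounds(Wn_s, 14); sf = sha_rounds(Wf_s, 14)
--     da13 = (sf[13][0] - sn[13][0]) & MASK
--     dw16 = (Wf_s[16] - Wn_s[16]) & MASK
--     return (da13 + dw16) & MASK, da13, dw16
-- ===== SOURCE B (Python) =====
-- MASK = 0xFFFFFFFF
--
-- def rotr(x, n): return ((x >> n) | (x << (32-n))) & MASK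
--
-- def sig0(x):  return rotr(x,7) ^ rotr(x,18) ^ (x>>3)
--
-- def sig1(x):  return rotr(x,17) ^ rotr(x,19) ^ (x>>10)
--
-- def Sig0(x):  return rotr(x,2) ^ rotr(x,13) ^ rotr(x,22)
--
-- def Sig1(x):  return rotr(x,6) ^ rotr(x,11) ^ rotr(x,25)
--
-- def Ch(e,f,g):  return ((e&f) ^ (~e&g)) & MASK
--
-- def Maj(a,b,c): return (a&b) ^ (a&c) ^ (b&c)
--
-- K = [0x428a2f98,0x71374491,0xb5c0fbcf,0xe9b5dba5,0x3956c25b,0x59f111f1,0x923f82a4,0xab1c5ed5,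
--      0xd807aa98,0x12835b01,0x243185be,0x550c7dc3,0x72be5d74,0x80deb1fe,0x9bdc06a7,0xc19bf174]
--
-- IV = [0x6a09e667,0xbb67ae85,0x3c6ef372,0xa54ff53a,0x510e527f,0x9b05688c,0x1f83d9ab,0x5be0cd19]
--
-- def round1(st, r, w):
--     a,b,c,d,e,f,g,h = st
--     T1 = (h + Sig1(e) + Ch(e,f,g) + K[r] + w) & MASK
--     T2 = (Sig0(a) + Maj(a,b,c)) & MASK
--     return [(T1+T2)&MASK, a, b, c, (d+T1)&MASK, e, f, g]
--
-- def compute_f17_j(W0, W1, j):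
--     DW0 = 1 << j
--     Wn = [W0, W1] + [0]*14
--     # one pass over the unperturbed branch: e-values of every state, a after 13 rounds
--     st = IV
--     n_e = [st[4]]
--     a13n = 0
--     for r in range(16):
--         st = round1(st, r, Wn[r])
--         n_e.append(st[4])
--         if r == 12:
--             a13n = st[0]
--     # perturbed branch, computed incrementally: one trial round + one final round per word
--     DWs = [0]*16
--     DWs[0] = DW0
--     S = IV
--     a13f = 0
--     for r in range(2):
--         S = round1(S, r, (Wn[r] + DWs[r]) & MASK)
--     for wi in range(2, 16):
--         e_trial = round1(S, wi, Wn[wi] & MASK)[4]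
--         DWs[wi] = (n_e[wi+1] - e_trial) & MASK
--         S = round1(S, wi, (Wn[wi] + DWs[wi]) & MASK)
--         if wi == 12:
--             a13f = S[0]
--     da13 = (a13f - a13n) & MASK
--     w16n = (sig1(Wn[14]) + Wn[9] + sig0(Wn[1]) + Wn[0]) & MASK
--     w16f = (sig1((Wn[14]+DWs[14])&MASK) + ((Wn[9]+DWs[9])&MASK)
--             + sig0((Wn[1]+DWs[1])&MASK) + ((Wn[0]+DWs[0])&MASK)) & MASK
--     dw16 = (w16f - w16n) & MASK
--     return (da13 + dw16) & MASK, da13, dw16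
-- ===== Notes on version B (the rewrite author's own statement) =====
-- stated objective: faster
-- what changed: A reruns the full normal branch and rebuilds a 64-word message schedule from scratch on every of its 14 correction steps; B runs the normal branch once into a table of e-values, never builds the 64-word schedule (the rounds only read the first 16 words, and W[16] is computed by its closed four-term formula), and advances the perturbed state incrementally with one trial round plus one committed round per word.
import Mathlib
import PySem

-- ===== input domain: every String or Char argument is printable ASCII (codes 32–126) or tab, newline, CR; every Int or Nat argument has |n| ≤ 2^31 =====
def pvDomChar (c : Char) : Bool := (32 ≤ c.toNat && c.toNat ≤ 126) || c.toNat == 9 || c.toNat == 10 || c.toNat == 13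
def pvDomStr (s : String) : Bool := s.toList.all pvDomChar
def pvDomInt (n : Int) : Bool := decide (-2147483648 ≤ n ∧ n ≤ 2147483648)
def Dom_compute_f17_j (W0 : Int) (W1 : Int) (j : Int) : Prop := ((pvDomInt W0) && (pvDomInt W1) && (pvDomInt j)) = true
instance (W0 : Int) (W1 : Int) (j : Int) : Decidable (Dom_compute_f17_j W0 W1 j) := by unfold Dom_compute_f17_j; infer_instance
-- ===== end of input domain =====

-- B replaces A's quadratic "rerun the whole normal branch and rebuild a 64-word schedule on every
-- step" by ONE normal-branch pass stored in a table plus an O(1) incremental update of the perturbed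
-- state (one trial round + one committed round per word); the 64-word schedule is never built.

-- ===== PORT A =====
def MASK : Int := 4294967295
def bandM (x : Int) : Int := PySem.Int.band x MASK   -- "x & MASK"
def rotr (x : Int) (n : Nat) : Int := bandM (PySem.Int.bor (x >>> n) (x <<< (32 - n)))
def sig0 (x : Int) : Int := PySem.Int.bxor (PySem.Int.bxor (rotr x 7) (rotr x 18)) (x >>> (3 : Nat))
def sig1 (x : Int) : Int := PySem.Int.bxor (PySem.Int.bxor (rotr x 17) (rotr x 19)) (x >>> (10 : Nat))
def bSig0 (x : Int) : Int := PySem.Int.bxor (PySem.Int.bxor (rotr x 2) (rotr x 13)) (rotr x 22)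
def bSig1 (x : Int) : Int := PySem.Int.bxor (PySem.Int.bxor (rotr x 6) (rotr x 11)) (rotr x 25)
def pCh (e f g : Int) : Int := bandM (PySem.Int.bxor (PySem.Int.band e f) (PySem.Int.band (Int.not e) g))
def pMaj (a b c : Int) : Int := PySem.Int.bxor (PySem.Int.bxor (PySem.Int.band a b) (PySem.Int.band a c)) (PySem.Int.band b c)

def K : List Int := [0x428a2f98,0x71374491,0xb5c0fbcf,0xe9b5dba5,0x3956c25b,0x59f111f1,0x923f82a4,0xab1c5ed5,
     0xd807aa98,0x12835b01,0x243185be,0x550c7dc3,0x72be5d74,0x80deb1fe,0x9bdc06a7,0xc19bf174,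
     0xe49b69c1,0xefbe4786,0x0fc19dc6,0x240ca1cc,0x2de92c6f,0x4a7484aa,0x5cb0a9dc,0x76f988da,
     0x983e5152,0xa831c66d,0xb00327c8,0xbf597fc7,0xc6e00bf3,0xd5a79147,0x06ca6351,0x14292967,
     0x27b70a85,0x2e1b2138,0x4d2c6dfc,0x53380d13,0x650a7354,0x766a0abb,0x81c2c92e,0x92722c85,
     0xa2bfe8a1,0xa81a664b,0xc24b8b70,0xc76c51a3,0xd192e819,0xd6990624,0xf40e3585,0x106aa070,
     0x19a4c116,0x1e376c08,0x2748774c,0x34b0bcb5,0x391c0cb3,0x4ed8aa4a,0x5b9cca4f,0x682e6ff3,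
     0x748f82ee,0x78a5636f,0x84c87814,0x8cc70208,0x90befffa,0xa4506ceb,0xbef9a3f7,0xc67178f2]

def IV : List Int := [0x6a09e667,0xbb67ae85,0x3c6ef372,0xa54ff53a,0x510e527f,0x9b05688c,0x1f83d9ab,0x5be0cd19]

-- body of A's round loop (the state list is [a,b,c,d,e,f,g,h])
def shaStep (st : List Int) (r : Int) (W : List Int) : List Int :=
  let a := PySem.List.pyGetD st 0 0
  let b := PySem.List.pyGetD st 1 0
  let c := PySem.List.pyGetD st 2 0
  let d := PySem.List.pyGetD st 3 0
  let e := PySem.List.pyGetD st 4 0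
  let f := PySem.List.pyGetD st 5 0
  let g := PySem.List.pyGetD st 6 0
  let h := PySem.List.pyGetD st 7 0
  let T1 := bandM (h + bSig1 e + pCh e f g + PySem.List.pyGetD K r 0 + PySem.List.pyGetD W r 0)
  let T2 := bandM (bSig0 a + pMaj a b c)
  [bandM (T1 + T2), a, b, c, bandM (d + T1), e, f, g]

def make_schedule (W16 : List Int) : List Int :=
  (PySem.List.pyRange 16 64 1).foldl
    (fun W i =>
      PySem.List.pySetD W i
        (bandM (sig1 (PySem.List.pyGetD W (i-2) 0) + PySem.List.pyGetD W (i-7) 0 +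
                sig0 (PySem.List.pyGetD W (i-15) 0) + PySem.List.pyGetD W (i-16) 0)))
    (W16 ++ List.replicate 48 0)

def sha_rounds (W : List Int) (R : Int) : List (List Int) :=
  ((PySem.List.pyRange 0 R 1).foldl
    (fun (p : List (List Int) × List Int) r =>
      let st := shaStep p.2 r W
      (p.1 ++ [st], st))
    ([IV], IV)).1

def compute_f17_j (W0 : Int) (W1 : Int) (j : Int) : Int × Int × Int :=
  let DW0 : Int := (1 : Int) <<< j.toNat       -- 1 << j  (Python raises for j < 0: excluded by Pre_)
  let Wn : List Int := [W0, W1] ++ List.replicate 14 0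
  let DWs0 := PySem.List.pySetD (List.replicate 16 (0 : Int)) 0 DW0
  let Wf_tmp := (PySem.List.pyRange 0 16 1).map
      (fun i => bandM (PySem.List.pyGetD Wn i 0 + PySem.List.pyGetD DWs0 i 0))
  let sn3 := sha_rounds (make_schedule Wn) 3
  let sf3 := sha_rounds (make_schedule Wf_tmp) 3
  let DWs1 := PySem.List.pySetD DWs0 2
      (bandM (-(PySem.List.pyGetD (PySem.List.pyGetD sf3 3 []) 4 0 - PySem.List.pyGetD (PySem.List.pyGetD sn3 3 []) 4 0)))
  let DWsF := (PySem.List.pyRange 0 13 1).foldl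
      (fun DWs step =>
        let wi := step + 3
        let dt := step + 4
        let Wfc := (PySem.List.pyRange 0 16 1).map
            (fun i => bandM (PySem.List.pyGetD Wn i 0 + PySem.List.pyGetD DWs i 0))
        let sn := sha_rounds (make_schedule Wn) dt
        let sf := sha_rounds (make_schedule Wfc) dt
        PySem.List.pySetD DWs wi
          (bandM (-(PySem.List.pyGetD (PySem.List.pyGetD sf dt []) 4 0 - PySem.List.pyGetD (PySem.List.pyGetD sn dt []) 4 0))))
      DWs1
  let Wf := (PySem.List.pyRange 0 16 1).map
      (fun i => bandM (PySem.List.pyGetD Wn i 0 + PySem.List.pyGetD DWsF i 0))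
  let Wn_s := make_schedule Wn
  let Wf_s := make_schedule Wf
  let sn := sha_rounds Wn_s 14
  let sf := sha_rounds Wf_s 14
  let da13 := bandM (PySem.List.pyGetD (PySem.List.pyGetD sf 13 []) 0 0 - PySem.List.pyGetD (PySem.List.pyGetD sn 13 []) 0 0)
  let dw16 := bandM (PySem.List.pyGetD Wf_s 16 0 - PySem.List.pyGetD Wn_s 16 0)
  (bandM (da13 + dw16), da13, dw16)

-- ===== PORT B =====
def round1 (st : List Int) (r : Int) (w : Int) : List Int :=
  let a := PySem.List.pyGetD st 0 0
  let b := PySem.List.pyGetD st 1 0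
  let c := PySem.List.pyGetD st 2 0
  let d := PySem.List.pyGetD st 3 0
  let e := PySem.List.pyGetD st 4 0
  let f := PySem.List.pyGetD st 5 0
  let g := PySem.List.pyGetD st 6 0
  let h := PySem.List.pyGetD st 7 0
  let T1 := bandM (h + bSig1 e + pCh e f g + PySem.List.pyGetD K r 0 + w)
  let T2 := bandM (bSig0 a + pMaj a b c)
  [bandM (T1 + T2), a, b, c, bandM (d + T1), e, f, g]

def compute_f17_j_alt (W0 : Int) (W1 : Int) (j : Int) : Int × Int × Int :=
  let DW0 : Int := (1 : Int) <<< j.toNat       -- 1 << j  (Python raises for j < 0: excluded by Pre_)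
  let Wn : List Int := [W0, W1] ++ List.replicate 14 0
  -- one pass over the unperturbed branch: every e-value, and a after 13 rounds
  let np := (PySem.List.pyRange 0 16 1).foldl
      (fun (p : List Int × Int × List Int) r =>
        let st := round1 p.2.2 r (PySem.List.pyGetD Wn r 0)
        (p.1 ++ [PySem.List.pyGetD st 4 0],
         (if r == 12 then PySem.List.pyGetD st 0 0 else p.2.1), st))
      ([PySem.List.pyGetD IV 4 0], 0, IV)
  let n_e := np.1
  let a13n := np.2.1
  -- perturbed branch, incrementally: one trial round + one committed round per word
  let DWs0 := PySem.List.pySetD (List.replicate 16 (0 : Int)) 0 DW0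
  let S0 := (PySem.List.pyRange 0 2 1).foldl
      (fun S r => round1 S r (bandM (PySem.List.pyGetD Wn r 0 + PySem.List.pyGetD DWs0 r 0))) IV
  let q := (PySem.List.pyRange 2 16 1).foldl
      (fun (p : List Int × List Int × Int) wi =>
        let eT := PySem.List.pyGetD (round1 p.2.1 wi (bandM (PySem.List.pyGetD Wn wi 0))) 4 0
        let dv := bandM (PySem.List.pyGetD n_e (wi+1) 0 - eT)
        let DWs' := PySem.List.pySetD p.1 wi dv
        let S' := round1 p.2.1 wi (bandM (PySem.List.pyGetD Wn wi 0 + PySem.List.pyGetD DWs' wi 0))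
        (DWs', S', (if wi == 12 then PySem.List.pyGetD S' 0 0 else p.2.2)))
      (DWs0, S0, 0)
  let DWs := q.1
  let a13f := q.2.2
  let da13 := bandM (a13f - a13n)
  let w16n := bandM (sig1 (PySem.List.pyGetD Wn 14 0) + PySem.List.pyGetD Wn 9 0 +
                     sig0 (PySem.List.pyGetD Wn 1 0) + PySem.List.pyGetD Wn 0 0)
  let w16f := bandM (sig1 (bandM (PySem.List.pyGetD Wn 14 0 + PySem.List.pyGetD DWs 14 0)) +
                     bandM (PySem.List.pyGetD Wn 9 0 + PySem.List.pyGetD DWs 9 0) +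
                     sig0 (bandM (PySem.List.pyGetD Wn 1 0 + PySem.List.pyGetD DWs 1 0)) +
                     bandM (PySem.List.pyGetD Wn 0 0 + PySem.List.pyGetD DWs 0 0))
  let dw16 := bandM (w16f - w16n)
  (bandM (da13 + dw16), da13, dw16)

-- ===== PRECONDITION & SPEC =====
-- Pre_ excludes exactly j < 0, where Python's "1 << j" raises ValueError.
def Pre_compute_f17_j (W0 : Int) (W1 : Int) (j : Int) : Prop := 0 ≤ j
instance (W0 : Int) (W1 : Int) (j : Int) : Decidable (Pre_compute_f17_j W0 W1 j) := by unfold Pre_compute_f17_j; infer_instance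
def pvWitness_compute_f17_j : Int × Int × Int := (1, 2, 5)

def Spec_compute_f17_j (W0 : Int) (W1 : Int) (j : Int) (out : Int × Int × Int) : Prop := out = compute_f17_j_alt W0 W1 j
instance (W0 : Int) (W1 : Int) (j : Int) (out : Int × Int × Int) : Decidable (Spec_compute_f17_j W0 W1 j out) := by unfold Spec_compute_f17_j; infer_instance

-- ===== CLAIM (what is proved, stated in full; the proofs are below) =====
def Claim_equal_compute_f17_j : Prop := ∀ (W0 : Int) (W1 : Int) (j : Int), Dom_compute_f17_j W0 W1 j → Pre_compute_f17_j W0 W1 j → Spec_compute_f17_j W0 W1 j (compute_f17_j W0 W1 j)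

-- ===== LEMMAS AND PROOFS =====

theorem shaStep_eq_round1 (st : List Int) (r : Int) (W : List Int) :
    shaStep st r W = round1 st r (PySem.List.pyGetD W r 0) := rfl

-- pure "state after t rounds with message words W"
def stN (W : List Int) : Nat → List Int
  | 0 => IV
  | t+1 => shaStep (stN W t) (t : Int) W

theorem sha_fold (W : List Int) (n : Nat) :
    (PySem.List.pyRange 0 (n : Int) 1).foldl
      (fun (p : List (List Int) × List Int) r =>
        let st := shaStep p.2 r W
        (p.1 ++ [st], st))
      ([IV], IV)
    = ((List.range (n+1)).map (stN W), stN W n) := by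
  induction n with
  | zero => simp [PySem.List.pyRange_one_eq_nil, stN]
  | succ n ih =>
      have hc : ((n+1 : Nat) : Int) = (n : Int) + 1 := by push_cast; ring
      rw [hc, PySem.List.pyRange_one_succ_right (by positivity), List.foldl_append, ih]
      simp [List.range_succ, stN]

theorem sha_rounds_natCast (W : List Int) (n : Nat) :
    sha_rounds W (n : Int) = (List.range (n+1)).map (stN W) := by
  unfold sha_rounds; rw [sha_fold]

theorem sha_getD (W : List Int) (n t : Nat) (h : t ≤ n) :
    PySem.List.pyGetD (sha_rounds W (n : Int)) (t : Int) [] = stN W t := by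
  rw [sha_rounds_natCast, PySem.List.pyGetD_natCast,
      PySem.List.getD_map_range _ _ _ _ (by omega)]

theorem stN_congr (W W' : List Int) (n : Nat)
    (h : ∀ t : Nat, t < n → PySem.List.pyGetD W (t : Int) 0 = PySem.List.pyGetD W' (t : Int) 0) :
    stN W n = stN W' n := by
  induction n with
  | zero => rfl
  | succ n ih =>
      have := ih (fun t ht => h t (Nat.lt_succ_of_lt ht))
      simp only [stN, shaStep_eq_round1, this, h n (Nat.lt_succ_self n)]

theorem sched_preserve (l : List Int) (W : List Int) (k : Nat) (h : ∀ i ∈ l, (k : Int) < i) :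
    PySem.List.pyGetD
      (l.foldl (fun W i =>
        PySem.List.pySetD W i
          (bandM (sig1 (PySem.List.pyGetD W (i-2) 0) + PySem.List.pyGetD W (i-7) 0 +
                  sig0 (PySem.List.pyGetD W (i-15) 0) + PySem.List.pyGetD W (i-16) 0))) W)
      (k : Int) 0
    = PySem.List.pyGetD W (k : Int) 0 := by
  induction l generalizing W with
  | nil => rfl
  | cons i l ih =>
      rw [List.foldl_cons, ih _ (fun i hi => h i (List.mem_cons_of_mem _ hi))]
      have hki : (k : Int) < i := h i (List.mem_cons_self ..)
      rw [PySem.List.pySetD_of_nonneg _ _ (by omega), PySem.List.pyGetD_natCast, PySem.List.pyGetD_natCast]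
      simp [List.getD, List.getElem?_set_ne (show i.toNat ≠ k by omega)]

theorem sched_prefix (W16 : List Int) (hl : W16.length = 16) (k : Nat) (hk : k < 16) :
    PySem.List.pyGetD (make_schedule W16) (k : Int) 0 = PySem.List.pyGetD W16 (k : Int) 0 := by
  unfold make_schedule
  rw [sched_preserve _ _ _ (fun i hi => by
        have := (PySem.List.mem_pyRange_one).1 hi; omega)]
  rw [PySem.List.pyGetD_natCast, PySem.List.pyGetD_natCast]
  simp [List.getD, List.getElem?_append_left (show k < W16.length by omega)]

theorem sched_16 (W16 : List Int) (hl : W16.length = 16) :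
    PySem.List.pyGetD (make_schedule W16) (16 : Int) 0
    = bandM (sig1 (PySem.List.pyGetD W16 14 0) + PySem.List.pyGetD W16 9 0 +
             sig0 (PySem.List.pyGetD W16 1 0) + PySem.List.pyGetD W16 0 0) := by
  unfold make_schedule
  rw [PySem.List.pyRange_one_cons (by norm_num), List.foldl_cons,
      show (16:Int)+1 = 17 from by norm_num]
  have hp := fun W => sched_preserve (PySem.List.pyRange 17 64 1) W 16
      (fun i hi => by have := (PySem.List.mem_pyRange_one).1 hi; omega)
  simp only [Nat.cast_ofNat] at hp
  rw [hp]
  have hs := fun (v : Int) => PySem.List.pyGetD_pySetD_natCast (W16 ++ List.replicate 48 (0:Int)) 16 16 v 0 (by simp [hl])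
  simp only [Nat.cast_ofNat] at hs
  rw [hs]
  have hrd : ∀ m : Nat, m < 16 → PySem.List.pyGetD (W16 ++ List.replicate 48 (0:Int)) (m : Int) 0 = PySem.List.pyGetD W16 (m : Int) 0 := by
    intro m hm
    rw [PySem.List.pyGetD_natCast, PySem.List.pyGetD_natCast]
    simp [List.getD, List.getElem?_append_left (show m < W16.length by omega)]
  have h14 := hrd 14 (by norm_num); have h9 := hrd 9 (by norm_num)
  have h1 := hrd 1 (by norm_num); have h0 := hrd 0 (by norm_num)
  simp only [Nat.cast_ofNat, Nat.cast_one, Nat.cast_zero] at h14 h9 h1 h0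
  rw [show (16:Int) - 2 = 14 from by norm_num, show (16:Int) - 7 = 9 from by norm_num,
      show (16:Int) - 15 = 1 from by norm_num, show (16:Int) - 16 = 0 from by norm_num,
      h14, h9, h1, h0]
  simp

theorem stN_sched (X : List Int) (hl : X.length = 16) (t : Nat) (ht : t ≤ 16) :
    stN (make_schedule X) t = stN X t :=
  stN_congr _ _ _ (fun u hu => sched_prefix X hl u (by omega))

-- spec-side descriptions of the two programs
def Wn0 (W0 W1 : Int) : List Int := [W0, W1] ++ List.replicate 14 0

def wordsOf (W0 W1 : Int) (D : List Int) : List Int :=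
  (PySem.List.pyRange 0 16 1).map
    (fun i => bandM (PySem.List.pyGetD (Wn0 W0 W1) i 0 + PySem.List.pyGetD D i 0))

def eN (W0 W1 : Int) (t : Nat) : Int := PySem.List.pyGetD (stN (Wn0 W0 W1) t) 4 0

def dwSeq (W0 W1 DW0 : Int) : Nat → List Int
  | 0 => (List.replicate 16 0).set 0 DW0
  | k+1 => (dwSeq W0 W1 DW0 k).set (k+2)
      (bandM (eN W0 W1 (k+3) -
              PySem.List.pyGetD (stN (wordsOf W0 W1 (dwSeq W0 W1 DW0 k)) (k+3)) 4 0))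

theorem dwSeq_length (W0 W1 DW0 : Int) (k : Nat) : (dwSeq W0 W1 DW0 k).length = 16 := by
  induction k with
  | zero => simp [dwSeq]
  | succ k ih => simp [dwSeq, ih]

theorem dwSeq_getD_of_ge (W0 W1 DW0 : Int) (k m : Nat) (h : k + 2 ≤ m) :
    (dwSeq W0 W1 DW0 k).getD m 0 = 0 := by
  induction k with
  | zero =>
      show ((List.replicate 16 (0:Int)).set 0 DW0).getD m 0 = 0
      rw [List.getD_eq_getElem?_getD, List.getElem?_set_ne (by omega)]
      rcases Nat.lt_or_ge m 16 with hm | hm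
      · rw [List.getElem?_replicate]; simp [hm]
      · rw [List.getElem?_eq_none (by simpa using hm)]; rfl
  | succ k ih =>
      show ((dwSeq W0 W1 DW0 k).set (k+2) _).getD m 0 = 0
      rw [List.getD_eq_getElem?_getD, List.getElem?_set_ne (by omega),
          ← List.getD_eq_getElem?_getD]
      exact ih (by omega)

theorem dwSeq_getD_stable (W0 W1 DW0 : Int) (k d m : Nat) (hm : m < k + 2) :
    (dwSeq W0 W1 DW0 (k + d)).getD m 0 = (dwSeq W0 W1 DW0 k).getD m 0 := by
  induction d with
  | zero => rfl
  | succ d ih =>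
      rw [show k + (d + 1) = (k + d) + 1 from by omega]
      show ((dwSeq W0 W1 DW0 (k+d)).set (k+d+2) _).getD m 0 = _
      rw [List.getD_eq_getElem?_getD, List.getElem?_set_ne (by omega),
          ← List.getD_eq_getElem?_getD]
      exact ih

theorem words_getD (W0 W1 : Int) (D : List Int) (i : Nat) (hi : i < 16) :
    PySem.List.pyGetD (wordsOf W0 W1 D) (i : Int) 0
    = bandM (PySem.List.pyGetD (Wn0 W0 W1) (i : Int) 0 + (D.getD i 0)) := by
  unfold wordsOf
  have h := PySem.List.pyGetD_map_pyRange
      (fun i => bandM (PySem.List.pyGetD (Wn0 W0 W1) i 0 + PySem.List.pyGetD D i 0)) 16 i 0 hi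
  simp only [Nat.cast_ofNat] at h
  rw [h]; simp [PySem.List.pyGetD_natCast]

theorem words_length (W0 W1 : Int) (D : List Int) : (wordsOf W0 W1 D).length = 16 := by
  simp [wordsOf, PySem.List.length_pyRange_one]

theorem stN_words_stable (W0 W1 DW0 : Int) (k d t : Nat) (hk : k ≤ 14) (ht : t ≤ k + 2) :
    stN (wordsOf W0 W1 (dwSeq W0 W1 DW0 (k + d))) t = stN (wordsOf W0 W1 (dwSeq W0 W1 DW0 k)) t := by
  apply stN_congr
  intro u hu
  rw [words_getD _ _ _ u (by omega), words_getD _ _ _ u (by omega),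
      dwSeq_getD_stable W0 W1 DW0 k d u (by omega)]

-- the value every loop step stores (A's "-(ef - en)" written as "en - ef"; equal by neg_sub)
theorem dwSeq_succ_neg (W0 W1 DW0 : Int) (k : Nat) :
    dwSeq W0 W1 DW0 (k+1) = (dwSeq W0 W1 DW0 k).set (k+2)
      (bandM (-(PySem.List.pyGetD (stN (wordsOf W0 W1 (dwSeq W0 W1 DW0 k)) (k+3)) 4 0 -
               eN W0 W1 (k+3)))) := by
  rw [neg_sub]; rfl

theorem A_loop (W0 W1 DW0 : Int) (n : Nat) (hn : n ≤ 13) :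
    (PySem.List.pyRange 0 (n : Int) 1).foldl
      (fun DWs step =>
        let wi := step + 3
        let dt := step + 4
        let Wfc := (PySem.List.pyRange 0 16 1).map
            (fun i => bandM (PySem.List.pyGetD (Wn0 W0 W1) i 0 + PySem.List.pyGetD DWs i 0))
        let sn := sha_rounds (make_schedule (Wn0 W0 W1)) dt
        let sf := sha_rounds (make_schedule Wfc) dt
        PySem.List.pySetD DWs wi
          (bandM (-(PySem.List.pyGetD (PySem.List.pyGetD sf dt []) 4 0 - PySem.List.pyGetD (PySem.List.pyGetD sn dt []) 4 0))))
      (dwSeq W0 W1 DW0 1)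
    = dwSeq W0 W1 DW0 (n+1) := by
  induction n with
  | zero => simp [PySem.List.pyRange_one_eq_nil]
  | succ n ih =>
      have hc : ((n+1 : Nat) : Int) = (n : Int) + 1 := by push_cast; ring
      rw [hc, PySem.List.pyRange_one_succ_right (by positivity), List.foldl_append,
          ih (by omega)]
      simp only [List.foldl_cons, List.foldl_nil]
      -- the one extra step, at index n
      have hWfc : (PySem.List.pyRange 0 16 1).map
            (fun i => bandM (PySem.List.pyGetD (Wn0 W0 W1) i 0 + PySem.List.pyGetD (dwSeq W0 W1 DW0 (n+1)) i 0))
          = wordsOf W0 W1 (dwSeq W0 W1 DW0 (n+1)) := rfl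
      have hsf := sha_getD (make_schedule (wordsOf W0 W1 (dwSeq W0 W1 DW0 (n+1)))) (n+4) (n+4) le_rfl
      have hsn := sha_getD (make_schedule (Wn0 W0 W1)) (n+4) (n+4) le_rfl
      push_cast at hsf hsn
      rw [hWfc, hsf, hsn,
          stN_sched _ (words_length W0 W1 _) (n+4) (by omega),
          stN_sched _ (by simp [Wn0]) (n+4) (by omega),
          PySem.List.pySetD_of_nonneg _ _ (by positivity),
          show ((n:Int)+3).toNat = n+3 from by omega,
          dwSeq_succ_neg W0 W1 DW0 (n+1)]
      rfl

theorem B_normal (W0 W1 : Int) (n : Nat) (hn : n ≤ 16) :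
    (PySem.List.pyRange 0 (n : Int) 1).foldl
      (fun (p : List Int × Int × List Int) r =>
        let st := round1 p.2.2 r (PySem.List.pyGetD (Wn0 W0 W1) r 0)
        (p.1 ++ [PySem.List.pyGetD st 4 0],
         (if r == 12 then PySem.List.pyGetD st 0 0 else p.2.1), st))
      ([PySem.List.pyGetD IV 4 0], 0, IV)
    = ((List.range (n+1)).map (eN W0 W1),
       (if 13 ≤ n then PySem.List.pyGetD (stN (Wn0 W0 W1) 13) 0 0 else 0),
       stN (Wn0 W0 W1) n) := by
  induction n with
  | zero => simp [PySem.List.pyRange_one_eq_nil, stN, eN]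
  | succ n ih =>
      have hc : ((n+1 : Nat) : Int) = (n : Int) + 1 := by push_cast; ring
      rw [hc, PySem.List.pyRange_one_succ_right (by positivity), List.foldl_append,
          ih (by omega)]
      simp only [List.foldl_cons, List.foldl_nil]
      have hst : round1 (stN (Wn0 W0 W1) n) (n : Int) (PySem.List.pyGetD (Wn0 W0 W1) (n : Int) 0)
          = stN (Wn0 W0 W1) (n+1) := (shaStep_eq_round1 _ _ _).symm
      rw [hst, List.range_succ (n := n+1), List.map_append]
      have hif : ((n : Int) == 12) = decide (n = 12) := by
        by_cases h : n = 12 <;> simp [h] <;> omega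
      rw [hif]
      rcases Decidable.em (n = 12) with h | h
      · subst h; norm_num [eN]
      · have h13 : (13 ≤ n + 1) = (13 ≤ n) := propext (by omega)
        simp [h, eN, h13]

theorem B_loop (W0 W1 DW0 : Int) (k : Nat) (hk : k ≤ 14) :
    (PySem.List.pyRange 2 (2 + (k : Int)) 1).foldl
      (fun (p : List Int × List Int × Int) wi =>
        let eT := PySem.List.pyGetD (round1 p.2.1 wi (bandM (PySem.List.pyGetD (Wn0 W0 W1) wi 0))) 4 0
        let dv := bandM (PySem.List.pyGetD ((List.range 17).map (eN W0 W1)) (wi+1) 0 - eT)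
        let DWs' := PySem.List.pySetD p.1 wi dv
        let S' := round1 p.2.1 wi (bandM (PySem.List.pyGetD (Wn0 W0 W1) wi 0 + PySem.List.pyGetD DWs' wi 0))
        (DWs', S', (if wi == 12 then PySem.List.pyGetD S' 0 0 else p.2.2)))
      (dwSeq W0 W1 DW0 0, stN (wordsOf W0 W1 (dwSeq W0 W1 DW0 0)) 2, 0)
    = (dwSeq W0 W1 DW0 k,
       stN (wordsOf W0 W1 (dwSeq W0 W1 DW0 k)) (k+2),
       (if 11 ≤ k then PySem.List.pyGetD (stN (wordsOf W0 W1 (dwSeq W0 W1 DW0 11)) 13) 0 0 else 0)) := by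
  induction k with
  | zero =>
      rw [show (2:Int) + ((0:Nat):Int) = 2 from by norm_num, PySem.List.pyRange_one_eq_nil le_rfl]
      simp
  | succ k ih =>
      rw [show (2:Int) + ((k+1:Nat):Int) = (2 + (k:Int)) + 1 from by push_cast; ring,
          PySem.List.pyRange_one_succ_right (by omega), List.foldl_append, ih (by omega)]
      simp only [List.foldl_cons, List.foldl_nil]
      rw [show (2:Int) + ((k:Nat):Int) = ((k+2:Nat):Int) from by push_cast; ring]
      have hzero : (dwSeq W0 W1 DW0 k).getD (k+2) 0 = 0 := dwSeq_getD_of_ge _ _ _ _ _ le_rfl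
      have hword : PySem.List.pyGetD (wordsOf W0 W1 (dwSeq W0 W1 DW0 k)) ((k+2 : Nat) : Int) 0
          = bandM (PySem.List.pyGetD (Wn0 W0 W1) ((k+2 : Nat) : Int) 0) := by
        rw [words_getD _ _ _ (k+2) (by omega), hzero, add_zero]
      have htrial : stN (wordsOf W0 W1 (dwSeq W0 W1 DW0 k)) (k+3)
          = round1 (stN (wordsOf W0 W1 (dwSeq W0 W1 DW0 k)) (k+2)) ((k+2 : Nat) : Int)
              (bandM (PySem.List.pyGetD (Wn0 W0 W1) ((k+2 : Nat) : Int) 0)) := by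
        show shaStep _ _ _ = _
        rw [shaStep_eq_round1, hword]
      rw [← htrial]
      have hne : PySem.List.pyGetD ((List.range 17).map (eN W0 W1)) (((k+2 : Nat) : Int)+1) 0
          = eN W0 W1 (k+3) := by
        rw [show ((k+2 : Nat) : Int)+1 = ((k+3 : Nat) : Int) from by push_cast; ring,
            PySem.List.pyGetD_natCast, PySem.List.getD_map_range _ _ _ _ (by omega)]
      rw [hne, PySem.List.pySetD_natCast]
      have hsucc : (dwSeq W0 W1 DW0 k).set (k+2)
          (bandM (eN W0 W1 (k+3) - PySem.List.pyGetD (stN (wordsOf W0 W1 (dwSeq W0 W1 DW0 k)) (k+3)) 4 0))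
          = dwSeq W0 W1 DW0 (k+1) := rfl
      rw [hsucc, show PySem.List.pyGetD (dwSeq W0 W1 DW0 (k+1)) ((k+2 : Nat) : Int) 0
            = (dwSeq W0 W1 DW0 (k+1)).getD (k+2) 0 from PySem.List.pyGetD_natCast _ _ _]
      have hval : (dwSeq W0 W1 DW0 (k+1)).getD (k+2) 0
          = bandM (eN W0 W1 (k+3) - PySem.List.pyGetD (stN (wordsOf W0 W1 (dwSeq W0 W1 DW0 k)) (k+3)) 4 0) := by
        show ((dwSeq W0 W1 DW0 k).set (k+2) _).getD (k+2) 0 = _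
        rw [List.getD_eq_getElem?_getD, List.getElem?_set_self (by rw [dwSeq_length]; omega)]
        rfl
      rw [hval]
      have hS' : stN (wordsOf W0 W1 (dwSeq W0 W1 DW0 (k+1))) (k+3)
          = round1 (stN (wordsOf W0 W1 (dwSeq W0 W1 DW0 k)) (k+2)) ((k+2 : Nat) : Int)
              (bandM (PySem.List.pyGetD (Wn0 W0 W1) ((k+2 : Nat) : Int) 0 +
                bandM (eN W0 W1 (k+3) - PySem.List.pyGetD (stN (wordsOf W0 W1 (dwSeq W0 W1 DW0 k)) (k+3)) 4 0))) := by
        show shaStep _ _ _ = _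
        rw [shaStep_eq_round1, words_getD _ _ _ (k+2) (by omega), hval,
            stN_words_stable W0 W1 DW0 k 1 (k+2) (by omega) le_rfl]
      rw [← hS']
      by_cases hk10 : k = 10
      · subst hk10; norm_num
      · have hbeq : (((k+2 : Nat) : Int) == 12) = false := by
          simp only [beq_eq_false_iff_ne, ne_eq]; omega
        have h11 : (11 ≤ k + 1) ↔ (11 ≤ k) := by omega
        simp [h11]
        intro h
        exact absurd h (by omega)

def outSpec (W0 W1 DW0 : Int) : Int × Int × Int :=
  let Wn := Wn0 W0 W1
  let D := dwSeq W0 W1 DW0 14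
  let da13 := bandM (PySem.List.pyGetD (stN (wordsOf W0 W1 (dwSeq W0 W1 DW0 11)) 13) 0 0 -
                     PySem.List.pyGetD (stN Wn 13) 0 0)
  let w16n := bandM (sig1 (PySem.List.pyGetD Wn 14 0) + PySem.List.pyGetD Wn 9 0 +
                     sig0 (PySem.List.pyGetD Wn 1 0) + PySem.List.pyGetD Wn 0 0)
  let w16f := bandM (sig1 (bandM (PySem.List.pyGetD Wn 14 0 + D.getD 14 0)) +
                     bandM (PySem.List.pyGetD Wn 9 0 + D.getD 9 0) +
                     sig0 (bandM (PySem.List.pyGetD Wn 1 0 + D.getD 1 0)) +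
                     bandM (PySem.List.pyGetD Wn 0 0 + D.getD 0 0))
  let dw16 := bandM (w16f - w16n)
  (bandM (da13 + dw16), da13, dw16)

theorem A_eq (W0 W1 j : Int) : compute_f17_j W0 W1 j = outSpec W0 W1 ((1 : Int) <<< j.toNat) := by
  have hWn : ([W0, W1] ++ List.replicate 14 0 : List Int) = Wn0 W0 W1 := rfl
  simp only [compute_f17_j, outSpec]
  generalize (1:Int) <<< j.toNat = DW0
  rw [hWn, PySem.List.pySetD_of_nonneg _ _ le_rfl, Int.toNat_zero]
  have h0 : ((List.replicate 16 0).set 0 DW0 : List Int) = dwSeq W0 W1 DW0 0 := rfl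
  rw [h0]
  have hWf0 : (PySem.List.pyRange 0 16 1).map
      (fun i => bandM (PySem.List.pyGetD (Wn0 W0 W1) i 0 + PySem.List.pyGetD (dwSeq W0 W1 DW0 0) i 0))
      = wordsOf W0 W1 (dwSeq W0 W1 DW0 0) := rfl
  rw [hWf0]
  have hsn3 := sha_getD (make_schedule (Wn0 W0 W1)) 3 3 le_rfl
  have hsf3 := sha_getD (make_schedule (wordsOf W0 W1 (dwSeq W0 W1 DW0 0))) 3 3 le_rfl
  simp only [Nat.cast_ofNat] at hsn3 hsf3
  rw [hsn3, hsf3, stN_sched _ (words_length W0 W1 _) 3 (by norm_num),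
      stN_sched _ (by simp [Wn0]) 3 (by norm_num)]
  have hD1 : PySem.List.pySetD (dwSeq W0 W1 DW0 0) 2
      (bandM (-(PySem.List.pyGetD (stN (wordsOf W0 W1 (dwSeq W0 W1 DW0 0)) 3) 4 0 -
               PySem.List.pyGetD (stN (Wn0 W0 W1) 3) 4 0)))
      = dwSeq W0 W1 DW0 1 := by
    rw [neg_sub, PySem.List.pySetD_of_nonneg _ _ (by norm_num)]
    rfl
  rw [hD1]
  have hloop := A_loop W0 W1 DW0 13 le_rfl
  simp only [Nat.cast_ofNat] at hloop
  rw [show (13:Nat)+1 = 14 from by norm_num] at hloop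
  rw [hloop]
  have hWf14 : (PySem.List.pyRange 0 16 1).map
      (fun i => bandM (PySem.List.pyGetD (Wn0 W0 W1) i 0 + PySem.List.pyGetD (dwSeq W0 W1 DW0 14) i 0))
      = wordsOf W0 W1 (dwSeq W0 W1 DW0 14) := rfl
  rw [hWf14]
  have hsf14 := sha_getD (make_schedule (wordsOf W0 W1 (dwSeq W0 W1 DW0 14))) 14 13 (by norm_num)
  have hsn14 := sha_getD (make_schedule (Wn0 W0 W1)) 14 13 (by norm_num)
  simp only [Nat.cast_ofNat] at hsf14 hsn14
  rw [hsf14, hsn14, stN_sched _ (words_length W0 W1 _) 13 (by norm_num),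
      stN_sched _ (by simp [Wn0]) 13 (by norm_num)]
  have hstab := stN_words_stable W0 W1 DW0 11 3 13 (by norm_num) (by norm_num)
  rw [show (11:Nat)+3 = 14 from by norm_num] at hstab
  rw [hstab]
  rw [sched_16 _ (words_length W0 W1 _), sched_16 _ (by simp [Wn0])]
  have g14 := words_getD W0 W1 (dwSeq W0 W1 DW0 14) 14 (by norm_num)
  have g9 := words_getD W0 W1 (dwSeq W0 W1 DW0 14) 9 (by norm_num)
  have g1 := words_getD W0 W1 (dwSeq W0 W1 DW0 14) 1 (by norm_num)
  have g0 := words_getD W0 W1 (dwSeq W0 W1 DW0 14) 0 (by norm_num)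
  simp only [Nat.cast_ofNat, Nat.cast_one, Nat.cast_zero] at g14 g9 g1 g0
  rw [g14, g9, g1, g0]

theorem B_eq (W0 W1 j : Int) : compute_f17_j_alt W0 W1 j = outSpec W0 W1 ((1 : Int) <<< j.toNat) := by
  have hWn : ([W0, W1] ++ List.replicate 14 0 : List Int) = Wn0 W0 W1 := rfl
  simp only [compute_f17_j_alt, outSpec]
  generalize (1:Int) <<< j.toNat = DW0
  rw [hWn]
  have hn := B_normal W0 W1 16 le_rfl
  simp only [Nat.cast_ofNat] at hn
  rw [show (16:Nat)+1 = 17 from by norm_num] at hn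
  rw [if_pos (show 13 ≤ 16 from by norm_num)] at hn
  rw [hn]
  rw [PySem.List.pySetD_of_nonneg _ _ le_rfl, Int.toNat_zero]
  have h0 : ((List.replicate 16 0).set 0 DW0 : List Int) = dwSeq W0 W1 DW0 0 := rfl
  rw [h0]
  have hS0 : (PySem.List.pyRange 0 2 1).foldl
      (fun S r => round1 S r (bandM (PySem.List.pyGetD (Wn0 W0 W1) r 0 + PySem.List.pyGetD (dwSeq W0 W1 DW0 0) r 0))) IV
      = stN (wordsOf W0 W1 (dwSeq W0 W1 DW0 0)) 2 := rfl
  rw [hS0]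
  have hq := B_loop W0 W1 DW0 14 le_rfl
  simp only [Nat.cast_ofNat] at hq
  rw [show ((2:Int) + (14:Int)) = 16 from by norm_num] at hq
  rw [show (14:Nat)+2 = 16 from by norm_num] at hq
  rw [if_pos (show 11 ≤ 14 from by norm_num)] at hq
  rw [hq]
  have gg : ∀ m : Nat, m < 16 → PySem.List.pyGetD (dwSeq W0 W1 DW0 14) (m : Int) 0 = (dwSeq W0 W1 DW0 14).getD m 0 :=
    fun m _ => PySem.List.pyGetD_natCast _ _ _
  have gg14 := gg 14 (by norm_num); have gg9 := gg 9 (by norm_num)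
  have gg1 := gg 1 (by norm_num); have gg0 := gg 0 (by norm_num)
  simp only [Nat.cast_ofNat, Nat.cast_one, Nat.cast_zero] at gg14 gg9 gg1 gg0
  rw [gg14, gg9, gg1, gg0]

-- ===== VERDICT (by name: the statement is the Claim_ definition above) =====
theorem compute_f17_j_spec : Claim_equal_compute_f17_j := by
  intro W0 W1 j _ _
  unfold Spec_compute_f17_j
  rw [A_eq, B_eq]
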